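-- pv_equiv track=rewrite | github.com/21centuryweather/RNS_NA_trials | plotting/plot_pp.py | get_exp_path
-- ===== SOURCE A (Python) =====
-- def get_exp_path(exp, cycle, variable, cycle_path):
--
--     exp_paths = {
--         f'CCIv2_GAL9': f'{cycle_path}/{cycle}/NA/0p11/GAL9/um',
--         f'CCIv2_GAL9_mod': f'{cycle_path}/{cycle}/NA/0p11/GAL9_mod/um',
--         f'CCIv2_RAL3P2': f'{cycle_path}/{cycle}/NA/0p04/RAL3P2/um',
--         f'CCIv2_RAL3P2_mod': f'{cycle_path}/{cycle}/NA/0p04/RAL3P2_mod/um',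
--     }
--
--     if variable == 'surface_roughness_length':
--         # replace um in exp_path items with ics
--         for key in exp_paths:
--             exp_paths[key] = exp_paths[key].replace('/um', '/ics')
--
--     return exp_paths[exp]
-- ===== SOURCE B (Python) =====
-- def get_exp_path(exp, cycle, variable, cycle_path):
--     components = {
--         'CCIv2_GAL9': ('0p11', 'GAL9'),
--         'CCIv2_GAL9_mod': ('0p11', 'GAL9_mod'),
--         'CCIv2_RAL3P2': ('0p04', 'RAL3P2'),
--         'CCIv2_RAL3P2_mod': ('0p04', 'RAL3P2_mod'),
--     }
--     res, model = components[exp]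
--     suffix = 'ics' if variable == 'surface_roughness_length' else 'um'
--     return f'{cycle_path}/{cycle}/NA/{res}/{model}/{suffix}'
-- ===== Notes on version B (the rewrite author's own statement) =====
-- stated objective: simpler
-- what changed: B replaces A's dict of four fully formatted paths plus a key-loop of str.replace('/um','/ics') calls by a lookup of (resolution, model) components, computing the trailing segment ('ics' vs 'um') once and formatting a single path; no loop and no string replacement is performed.
-- intended difference: When variable is 'surface_roughness_length' and '/um' occurs in the cycle_path/cycle prefix, A's blanket str.replace also rewrites that prefix (e.g. returns '/ics/c/NA/0p11/GAL9/ics' for cycle_path='/um'), while B returns '/um/c/NA/0p11/GAL9/ics' with the prefix intact, which is what the replacement was meant to do. — e.g. on get_exp_path("CCIv2_GAL9", "c", "surface_roughness_length", "/um"): A returns "/ics/c/NA/0p11/GAL9/ics", B returns "/um/c/NA/0p11/GAL9/ics"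
import Mathlib
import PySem

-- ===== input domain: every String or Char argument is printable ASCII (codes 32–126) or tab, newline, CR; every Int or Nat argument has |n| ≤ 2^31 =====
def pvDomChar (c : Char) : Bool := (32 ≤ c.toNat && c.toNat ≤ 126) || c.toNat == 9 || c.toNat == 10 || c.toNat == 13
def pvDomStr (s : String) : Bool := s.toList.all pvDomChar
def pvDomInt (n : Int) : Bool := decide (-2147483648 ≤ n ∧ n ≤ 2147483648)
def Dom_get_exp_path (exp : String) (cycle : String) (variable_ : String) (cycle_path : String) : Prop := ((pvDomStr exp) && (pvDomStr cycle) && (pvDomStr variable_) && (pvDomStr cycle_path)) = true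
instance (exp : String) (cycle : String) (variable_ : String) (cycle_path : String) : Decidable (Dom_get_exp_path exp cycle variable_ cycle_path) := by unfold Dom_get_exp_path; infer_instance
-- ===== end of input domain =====

-- B replaces A's dict of four full paths + loop of '/um'→'/ics' string replacements by a lookup of
-- (resolution, model) components and one formatted path (objective: simpler; return value only).

-- ===== PORT A =====
-- A builds a dict of four fully formatted paths, then (for 'surface_roughness_length') rewrites every
-- value with str.replace('/um','/ics') in a loop over the keys, then indexes the dict with exp
-- (KeyError on a missing key: excluded by Pre_, lookup yields none and getD "" is never reached there).
def get_exp_path (exp : String) (cycle : String) (variable_ : String) (cycle_path : String) : String :=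
  let exp_paths : PySem.Dict String String :=
    ((((PySem.Dict.empty.insert "CCIv2_GAL9" (cycle_path ++ "/" ++ cycle ++ "/NA/0p11/GAL9/um")).insert
        "CCIv2_GAL9_mod" (cycle_path ++ "/" ++ cycle ++ "/NA/0p11/GAL9_mod/um")).insert
        "CCIv2_RAL3P2" (cycle_path ++ "/" ++ cycle ++ "/NA/0p04/RAL3P2/um")).insert
        "CCIv2_RAL3P2_mod" (cycle_path ++ "/" ++ cycle ++ "/NA/0p04/RAL3P2_mod/um"))
  let exp_paths : PySem.Dict String String :=
    if variable_ == "surface_roughness_length" then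
      exp_paths.keys.foldl
        (fun d key => d.insert key (PySem.Str.replace (d.getD key "") "/um" "/ics")) exp_paths
    else exp_paths
  (exp_paths.get? exp).getD ""

-- ===== PORT B =====
-- B: look up exp's (resolution, model) components, compute the trailing segment once, format one path.
def get_exp_path_alt (exp : String) (cycle : String) (variable_ : String) (cycle_path : String) : String :=
  let components : PySem.Dict String (String × String) :=
    ((((PySem.Dict.empty.insert "CCIv2_GAL9" ("0p11", "GAL9")).insert
        "CCIv2_GAL9_mod" ("0p11", "GAL9_mod")).insert
        "CCIv2_RAL3P2" ("0p04", "RAL3P2")).insert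
        "CCIv2_RAL3P2_mod" ("0p04", "RAL3P2_mod"))
  match components.get? exp with
  | some (res, model) =>
      let suffix := if variable_ == "surface_roughness_length" then "ics" else "um"
      cycle_path ++ "/" ++ cycle ++ "/NA/" ++ res ++ "/" ++ model ++ "/" ++ suffix
  | none => ""  -- KeyError in Python: excluded by Pre_

-- ===== PRECONDITION & SPEC =====
-- Pre_ admits exactly the four experiment keys of A's dict; on any other exp, A raises KeyError.
def Pre_get_exp_path (exp : String) (cycle : String) (variable_ : String) (cycle_path : String) : Prop :=
  exp = "CCIv2_GAL9" ∨ exp = "CCIv2_GAL9_mod" ∨ exp = "CCIv2_RAL3P2" ∨ exp = "CCIv2_RAL3P2_mod"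
instance (exp : String) (cycle : String) (variable_ : String) (cycle_path : String) : Decidable (Pre_get_exp_path exp cycle variable_ cycle_path) := by unfold Pre_get_exp_path; infer_instance
def pvWitness_get_exp_path : String × String × String × String :=
  ("CCIv2_RAL3P2", "20200101T0000Z", "air_temperature", "/scratch/cylc-run")

-- When variable is 'surface_roughness_length' and the substring '/um' occurs in the cycle_path/cycle
-- prefix, A's blanket str.replace also mangles that prefix ('/um' → '/ics'); B returns the path with
-- the prefix intact and only the intended trailing 'um' segment replaced by 'ics', which is what the
-- replacement was for.
def D_get_exp_path (exp : String) (cycle : String) (variable_ : String) (cycle_path : String) : Prop :=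
  variable_ = "surface_roughness_length" ∧
    ['/', 'u', 'm'] <:+: (cycle_path.toList ++ '/' :: cycle.toList)
instance (exp : String) (cycle : String) (variable_ : String) (cycle_path : String) : Decidable (D_get_exp_path exp cycle variable_ cycle_path) := by unfold D_get_exp_path; infer_instance

def Spec_get_exp_path (exp : String) (cycle : String) (variable_ : String) (cycle_path : String) (out : String) : Prop := ¬ D_get_exp_path exp cycle variable_ cycle_path → out = get_exp_path_alt exp cycle variable_ cycle_path
instance (exp : String) (cycle : String) (variable_ : String) (cycle_path : String) (out : String) : Decidable (Spec_get_exp_path exp cycle variable_ cycle_path out) := by unfold Spec_get_exp_path; infer_instance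

def pvDiffWitness_get_exp_path : String × String × String × String :=
  ("CCIv2_GAL9", "c", "surface_roughness_length", "/um")
def pvDiffWitnessOut_get_exp_path : String × String :=
  ("/ics/c/NA/0p11/GAL9/ics", "/um/c/NA/0p11/GAL9/ics")

-- ===== CLAIM (what is proved, stated in full; the proofs are below) =====
def Claim_unchanged_get_exp_path : Prop := ∀ (exp : String) (cycle : String) (variable_ : String) (cycle_path : String), Dom_get_exp_path exp cycle variable_ cycle_path → Pre_get_exp_path exp cycle variable_ cycle_path → Spec_get_exp_path exp cycle variable_ cycle_path (get_exp_path exp cycle variable_ cycle_path)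
def Claim_changed_get_exp_path : Prop := Dom_get_exp_path (pvDiffWitness_get_exp_path.1) (pvDiffWitness_get_exp_path.2.1) (pvDiffWitness_get_exp_path.2.2.1) (pvDiffWitness_get_exp_path.2.2.2) ∧ Pre_get_exp_path (pvDiffWitness_get_exp_path.1) (pvDiffWitness_get_exp_path.2.1) (pvDiffWitness_get_exp_path.2.2.1) (pvDiffWitness_get_exp_path.2.2.2) ∧ D_get_exp_path (pvDiffWitness_get_exp_path.1) (pvDiffWitness_get_exp_path.2.1) (pvDiffWitness_get_exp_path.2.2.1) (pvDiffWitness_get_exp_path.2.2.2) ∧ get_exp_path (pvDiffWitness_get_exp_path.1) (pvDiffWitness_get_exp_path.2.1) (pvDiffWitness_get_exp_path.2.2.1) (pvDiffWitness_get_exp_path.2.2.2) = pvDiffWitnessOut_get_exp_path.1 ∧ get_exp_path_alt (pvDiffWitness_get_exp_path.1) (pvDiffWitness_get_exp_path.2.1) (pvDiffWitness_get_exp_path.2.2.1) (pvDiffWitness_get_exp_path.2.2.2) = pvDiffWitnessOut_get_exp_path.2 ∧ pvDiffWitnessOut_get_exp_path.1 ≠ pvDiffWitnessOut_get_exp_p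ath.2
def Claim_exact_get_exp_path : Prop := ∀ (exp : String) (cycle : String) (variable_ : String) (cycle_path : String), Dom_get_exp_path exp cycle variable_ cycle_path → Pre_get_exp_path exp cycle variable_ cycle_path → D_get_exp_path exp cycle variable_ cycle_path → get_exp_path exp cycle variable_ cycle_path ≠ get_exp_path_alt exp cycle variable_ cycle_path

-- ===== LEMMAS AND PROOFS =====

theorem pvGoLen (fuel : Nat) : ∀ (l acc : List Char), l.length ≤ fuel →
    (acc.length + l.length ≤ (PySem.Chars.replace.go ['/', 'u', 'm'] ['/', 'i', 'c', 's'] fuel l acc).length ∧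
     (['/', 'u', 'm'] <:+: l →
       acc.length + l.length + 1 ≤ (PySem.Chars.replace.go ['/', 'u', 'm'] ['/', 'i', 'c', 's'] fuel l acc).length)) := by
  induction fuel with
  | zero =>
    intro l acc hl
    have : l = [] := List.eq_nil_of_length_eq_zero (Nat.le_zero.mp hl)
    subst this
    rw [PySem.Chars.replace.go]
    constructor
    · simp
    · intro hh; exact absurd (List.eq_nil_of_infix_nil hh) (by decide)
  | succ f ih =>
    intro l acc hl
    match l with
    | [] =>
      rw [PySem.Chars.replace.go]
      constructor
      · simp
      · intro hh; exact absurd (List.eq_nil_of_infix_nil hh) (by decide)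
      omega
    | c :: t =>
      rw [PySem.Chars.replace.go]
      by_cases hp : List.isPrefixOf ['/', 'u', 'm'] (c :: t) = true
      · rw [hp]
        simp only [if_true]
        have hlen3 : 3 ≤ (c :: t).length :=
          (List.isPrefixOf_iff_prefix.mp hp).length_le
        have hd : (List.drop (['/', 'u', 'm'] : List Char).length (c :: t)).length = (c :: t).length - 3 := by
          simp
        have hf : (List.drop (['/', 'u', 'm'] : List Char).length (c :: t)).length ≤ f := by
          simp at hd ⊢; simp at hl; omega
        obtain ⟨h1, -⟩ := ih (List.drop (['/', 'u', 'm'] : List Char).length (c :: t)) (['/', 'i', 'c', 's'].reverse ++ acc) hf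
        constructor
        · simp at h1 ⊢; omega
        · intro _; simp at h1 ⊢; omega
      · rw [Bool.eq_false_iff.mpr hp]
        simp only [Bool.false_eq_true, if_false]
        have hf : t.length ≤ f := by simp at hl; omega
        obtain ⟨h1, h2⟩ := ih t (c :: acc) hf
        constructor
        · simp at h1 ⊢; omega
        · intro hh
          rcases List.infix_cons_iff.mp hh with hpre | hinf
          · exact absurd (List.isPrefixOf_iff_prefix.mpr hpre) hp
          · have := h2 hinf; simp at this ⊢; omega

theorem pvGoLen2 (m : List Char) : ∀ (fuel : Nat) (acc : List Char), m.length + 3 ≤ fuel →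
    ['/', 'u', 'm'] <:+: m →
    acc.length + m.length + 5 ≤
      (PySem.Chars.replace.go ['/', 'u', 'm'] ['/', 'i', 'c', 's'] fuel (m ++ ['/', 'u', 'm']) acc).length := by
  induction m with
  | nil =>
    intro fuel acc hf hin
    exact absurd (List.eq_nil_of_infix_nil hin) (by decide)
  | cons c m' ih =>
    intro fuel acc hf hin
    match fuel with
    | f + 1 =>
      rw [List.cons_append, PySem.Chars.replace.go]
      by_cases hp : List.isPrefixOf ['/', 'u', 'm'] (c :: (m' ++ ['/', 'u', 'm'])) = true
      · rw [hp]
        simp only [if_true]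
        match m', hin, hp with
        | [], hin, hp => simp [List.isPrefixOf] at hp
        | [a], hin, hp => simp [List.isPrefixOf] at hp
        | a :: b :: rest, hin, hp =>
          have hd : List.drop (['/', 'u', 'm'] : List Char).length (c :: (a :: b :: rest ++ ['/', 'u', 'm'])) = rest ++ ['/', 'u', 'm'] := by
            simp
          rw [hd]
          obtain ⟨-, h2⟩ := pvGoLen f (rest ++ ['/', 'u', 'm']) (['/', 'i', 'c', 's'].reverse ++ acc)
            (by simp at hf ⊢; omega)
          have := h2 ⟨rest, [], by simp⟩
          simp at this ⊢; omega
      · rw [Bool.eq_false_iff.mpr hp]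
        simp only [Bool.false_eq_true, if_false]
        have hin' : ['/', 'u', 'm'] <:+: m' := by
          rcases List.infix_cons_iff.mp hin with hpre | hinf
          · exact absurd (List.isPrefixOf_iff_prefix.mpr
              (hpre.trans (List.prefix_append _ _))) hp
          · exact hinf
        have := ih f (c :: acc) (by simp at hf ⊢; omega) hin'
        simp at this ⊢; omega

theorem pvTightCase (cp cy mid : String)
    (hin : ['/', 'u', 'm'] <:+: (cp.toList ++ '/' :: cy.toList)) :
    PySem.Str.replace ((cp ++ "/" ++ cy ++ mid) ++ "/um") "/um" "/ics" ≠ (cp ++ "/" ++ cy ++ mid) ++ "/ics" := by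
  intro heq
  have hlen := congrArg (fun s => s.toList.length) heq
  simp only [] at hlen
  have hXl : ((cp ++ "/" ++ cy ++ mid) ++ "/um").toList
      = (cp ++ "/" ++ cy ++ mid).toList ++ ['/', 'u', 'm'] := by
    rw [String.toList_append]; rfl
  have hinX : ['/', 'u', 'm'] <:+: (cp ++ "/" ++ cy ++ mid).toList := by
    apply List.IsInfix.trans hin
    apply List.IsPrefix.isInfix
    have : (cp ++ "/" ++ cy ++ mid).toList = (cp.toList ++ '/' :: cy.toList) ++ mid.toList := by
      simp [String.toList_append]
    rw [this]
    exact List.prefix_append _ _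
  have hrepl : (PySem.Str.replace ((cp ++ "/" ++ cy ++ mid) ++ "/um") "/um" "/ics").toList
      = PySem.Chars.replace.go ['/', 'u', 'm'] ['/', 'i', 'c', 's']
          ((cp ++ "/" ++ cy ++ mid).toList ++ ['/', 'u', 'm']).length
          ((cp ++ "/" ++ cy ++ mid).toList ++ ['/', 'u', 'm']) [] := by
    unfold PySem.Str.replace PySem.Chars.replace
    rw [hXl]
    simp [String.toList_ofList]
  have hlow := pvGoLen2 ((cp ++ "/" ++ cy ++ mid).toList)
      ((cp ++ "/" ++ cy ++ mid).toList ++ ['/', 'u', 'm']).length []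
      (by simp only [List.length_append, List.length_cons, List.length_nil]; omega) hinX
  rw [hrepl] at hlen
  have hr : ((cp ++ "/" ++ cy ++ mid) ++ "/ics").toList.length
      = (cp ++ "/" ++ cy ++ mid).toList.length + 4 := by
    rw [String.toList_append, List.length_append]; rfl
  rw [hr] at hlen
  simp only [List.length_nil] at hlow
  omega



theorem pvExt (xs T : List Char) (hT : ¬ ['/', 'u', 'm'] <:+: T) (hT2 : T.take 2 = ['/', 'N'])
    (hxs : ¬ ['/', 'u', 'm'] <:+: xs) : ¬ ['/', 'u', 'm'] <:+: (xs ++ T) := by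
  obtain ⟨t2, rfl⟩ : ∃ t2, T = '/' :: 'N' :: t2 := by
    match T, hT2 with
    | a :: b :: t2, h =>
      simp only [List.take, List.cons.injEq] at h
      exact ⟨t2, by simp [h.1, h.2.1]⟩
  clear hT2
  induction xs with
  | nil => simpa using hT
  | cons c xs' ih =>
    intro hinf
    rw [List.cons_append] at hinf
    rcases List.infix_cons_iff.mp hinf with hpre | hinf'
    · match xs', hxs, hpre with
      | [], hxs, hpre => simp [List.cons_prefix_cons] at hpre
      | [a], hxs, hpre => simp [List.cons_prefix_cons] at hpre
      | a :: b :: rest, hxs, hpre =>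
        simp only [List.cons_append, List.cons_prefix_cons] at hpre
        obtain ⟨hc, ha, hb, -⟩ := hpre
        exact hxs ⟨[], rest, by simp only [List.nil_append, List.cons_append, List.cons.injEq]; exact ⟨hc, ha, hb, trivial⟩⟩
    · exact ih (fun hh => hxs (List.infix_cons hh)) hinf'

theorem pvNoPre (c : Char) (xs' : List Char) (h : ¬ ['/', 'u', 'm'] <:+: (c :: xs')) :
    ['/', 'u', 'm'].isPrefixOf (c :: (xs' ++ ['/', 'u', 'm'])) = false := by
  rw [Bool.eq_false_iff]
  intro hp
  have hpre := List.isPrefixOf_iff_prefix.mp hp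
  match xs', h, hpre with
  | [], h, hpre => simp [List.cons_prefix_cons] at hpre
  | [a], h, hpre => simp [List.cons_prefix_cons] at hpre
  | a :: b :: rest, h, hpre =>
    simp only [List.cons_append, List.cons_prefix_cons] at hpre
    obtain ⟨hc, ha, hb, -⟩ := hpre
    exact h ⟨[], rest, by simp only [List.nil_append, List.cons_append, List.cons.injEq]; exact ⟨hc, ha, hb, trivial⟩⟩

theorem pvReplGo (P : List Char) (acc : List Char)
    (h : ¬ ['/', 'u', 'm'] <:+: P) :
    PySem.Chars.replace.go ['/', 'u', 'm'] ['/', 'i', 'c', 's'] (P.length + 3) (P ++ ['/', 'u', 'm']) acc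
      = acc.reverse ++ P ++ ['/', 'i', 'c', 's'] := by
  induction P generalizing acc with
  | nil =>
    simp [PySem.Chars.replace.go]
  | cons c P' ih =>
    have hl : (c :: P').length + 3 = P'.length + 3 + 1 := by simp
    rw [hl, List.cons_append, PySem.Chars.replace.go]
    rw [pvNoPre c P' h]
    simp only [Bool.false_eq_true, if_false]
    rw [ih (c :: acc) (fun hh => h (List.infix_cons hh))]
    simp

theorem pvReplStr (X : String) (h : ¬ ['/', 'u', 'm'] <:+: X.toList) :
    PySem.Str.replace (X ++ "/um") "/um" "/ics" = X ++ "/ics" := by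
  unfold PySem.Str.replace PySem.Chars.replace
  have h1 : (X ++ "/um").toList = X.toList ++ ['/', 'u', 'm'] := by
    rw [String.toList_append]; rfl
  have h2 : ("/um" : String).toList = ['/', 'u', 'm'] := rfl
  have h3 : ("/ics" : String).toList = ['/', 'i', 'c', 's'] := rfl
  rw [h1, h2, h3]
  simp only [List.isEmpty_cons, Bool.false_eq_true, if_false]
  have h4 : (X.toList ++ ['/', 'u', 'm']).length = X.toList.length + 3 := by simp
  rw [h4, pvReplGo X.toList [] h]
  apply String.toList_inj.mp
  simp [String.toList_append]

theorem pvFinish (cp cy mid : String)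
    (hn : ¬ ['/', 'u', 'm'] <:+: (cp ++ "/" ++ cy).toList)
    (hT : ¬ ['/', 'u', 'm'] <:+: mid.toList) (hT2 : mid.toList.take 2 = ['/', 'N']) :
    PySem.Str.replace ((cp ++ "/" ++ cy ++ mid) ++ "/um") "/um" "/ics" = (cp ++ "/" ++ cy ++ mid) ++ "/ics" := by
  apply pvReplStr
  intro hh
  have h2 : (cp ++ "/" ++ cy ++ mid).toList = (cp ++ "/" ++ cy).toList ++ mid.toList := by
    simp [String.toList_append]
  exact pvExt _ _ hT hT2 hn (h2 ▸ hh)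

theorem get_exp_path_spec : Claim_unchanged_get_exp_path := by
  intro exp cy var cp _dom hpre
  intro hD
  by_cases hv : var = "surface_roughness_length"
  · subst hv
    have hn : ¬ (['/', 'u', 'm'] <:+: (cp ++ "/" ++ cy).toList) := by
      intro hh
      refine hD ⟨rfl, ?_⟩
      simpa [String.toList_append] using hh
    rcases hpre with rfl | rfl | rfl | rfl <;>
      simp [get_exp_path, get_exp_path_alt, PySem.Dict.empty, PySem.Dict.insert,
        PySem.Dict.contains, PySem.Dict.get?, PySem.Dict.getD, PySem.Dict.keys,
        List.foldl]
    · rw [show cp ++ "/" ++ cy ++ "/NA/0p11/GAL9/um" = (cp ++ "/" ++ cy ++ "/NA/0p11/GAL9") ++ "/um" by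
        simp [String.append_assoc]]
      rw [pvFinish cp cy "/NA/0p11/GAL9" hn (by decide) (by decide)]
      simp [String.append_assoc]
    · rw [show cp ++ "/" ++ cy ++ "/NA/0p11/GAL9_mod/um" = (cp ++ "/" ++ cy ++ "/NA/0p11/GAL9_mod") ++ "/um" by
        simp [String.append_assoc]]
      rw [pvFinish cp cy "/NA/0p11/GAL9_mod" hn (by decide) (by decide)]
      simp [String.append_assoc]
    · rw [show cp ++ "/" ++ cy ++ "/NA/0p04/RAL3P2/um" = (cp ++ "/" ++ cy ++ "/NA/0p04/RAL3P2") ++ "/um" by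
        simp [String.append_assoc]]
      rw [pvFinish cp cy "/NA/0p04/RAL3P2" hn (by decide) (by decide)]
      simp [String.append_assoc]
    · rw [show cp ++ "/" ++ cy ++ "/NA/0p04/RAL3P2_mod/um" = (cp ++ "/" ++ cy ++ "/NA/0p04/RAL3P2_mod") ++ "/um" by
        simp [String.append_assoc]]
      rw [pvFinish cp cy "/NA/0p04/RAL3P2_mod" hn (by decide) (by decide)]
      simp [String.append_assoc]
  · have hbe : (var == "surface_roughness_length") = false := by simp [hv]
    rcases hpre with rfl | rfl | rfl | rfl <;>
      simp [get_exp_path, get_exp_path_alt, hbe, PySem.Dict.empty, PySem.Dict.insert,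
        PySem.Dict.contains, PySem.Dict.get?]
    all_goals simp [String.append_assoc]

theorem get_exp_path_changed : Claim_changed_get_exp_path := by
  unfold Claim_changed_get_exp_path; decide

theorem get_exp_path_tight : Claim_exact_get_exp_path := by
  intro exp cy var cp _dom hpre hD
  obtain ⟨hv, hin⟩ := hD
  subst hv
  rcases hpre with rfl | rfl | rfl | rfl <;>
    simp [get_exp_path, get_exp_path_alt, PySem.Dict.empty, PySem.Dict.insert,
      PySem.Dict.contains, PySem.Dict.get?, PySem.Dict.getD, PySem.Dict.keys, List.foldl]
  · rw [show cp ++ "/" ++ cy ++ "/NA/0p11/GAL9/um" = (cp ++ "/" ++ cy ++ "/NA/0p11/GAL9") ++ "/um" by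
        simp [String.append_assoc],
      show cp ++ "/" ++ cy ++ "/NA/" ++ "0p11" ++ "/" ++ "GAL9" ++ "/" ++ "ics" = (cp ++ "/" ++ cy ++ "/NA/0p11/GAL9") ++ "/ics" by
        simp [String.append_assoc]]
    exact pvTightCase cp cy "/NA/0p11/GAL9" hin
  · rw [show cp ++ "/" ++ cy ++ "/NA/0p11/GAL9_mod/um" = (cp ++ "/" ++ cy ++ "/NA/0p11/GAL9_mod") ++ "/um" by
        simp [String.append_assoc],
      show cp ++ "/" ++ cy ++ "/NA/" ++ "0p11" ++ "/" ++ "GAL9_mod" ++ "/" ++ "ics" = (cp ++ "/" ++ cy ++ "/NA/0p11/GAL9_mod") ++ "/ics" by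
        simp [String.append_assoc]]
    exact pvTightCase cp cy "/NA/0p11/GAL9_mod" hin
  · rw [show cp ++ "/" ++ cy ++ "/NA/0p04/RAL3P2/um" = (cp ++ "/" ++ cy ++ "/NA/0p04/RAL3P2") ++ "/um" by
        simp [String.append_assoc],
      show cp ++ "/" ++ cy ++ "/NA/" ++ "0p04" ++ "/" ++ "RAL3P2" ++ "/" ++ "ics" = (cp ++ "/" ++ cy ++ "/NA/0p04/RAL3P2") ++ "/ics" by
        simp [String.append_assoc]]
    exact pvTightCase cp cy "/NA/0p04/RAL3P2" hin
  · rw [show cp ++ "/" ++ cy ++ "/NA/0p04/RAL3P2_mod/um" = (cp ++ "/" ++ cy ++ "/NA/0p04/RAL3P2_mod") ++ "/um" by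
        simp [String.append_assoc],
      show cp ++ "/" ++ cy ++ "/NA/" ++ "0p04" ++ "/" ++ "RAL3P2_mod" ++ "/" ++ "ics" = (cp ++ "/" ++ cy ++ "/NA/0p04/RAL3P2_mod") ++ "/ics" by
        simp [String.append_assoc]]
    exact pvTightCase cp cy "/NA/0p04/RAL3P2_mod" hin
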